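-- pv_equiv track=rewrite | github.com/ArvinFarrelP/CipherVision | frequency_analysis.py | decrypt_with_map_upper
-- ===== SOURCE A (Python) =====
-- import string
--
-- def decrypt_with_map_upper(text, mapping):
--     out = []
--     for ch in text.upper():
--         if ch in string.ascii_uppercase:
--             out.append(mapping.get(ch, ch))
--         else:
--             out.append(ch)
--     return "".join(out)
-- ===== SOURCE B (Python) =====
-- import string
--
-- def decrypt_with_map_upper(text, mapping):
--     up = text.upper()
--     out = list(up)
--     for letter in string.ascii_uppercase:
--         if letter in mapping:
--             repl = mapping[letter]
--             for i, c in enumerate(up):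
--                 if c == letter:
--                     out[i] = repl
--     return "".join(out)
-- ===== Notes on version B (the rewrite author's own statement) =====
-- stated objective: faster
-- what changed: Inverts the loop: instead of one pass over the text with a dict lookup and branch per character, B makes one overwrite pass per mapped alphabet letter over a mutable character array, eliminating the per-character dict lookup and append.
import Mathlib
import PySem

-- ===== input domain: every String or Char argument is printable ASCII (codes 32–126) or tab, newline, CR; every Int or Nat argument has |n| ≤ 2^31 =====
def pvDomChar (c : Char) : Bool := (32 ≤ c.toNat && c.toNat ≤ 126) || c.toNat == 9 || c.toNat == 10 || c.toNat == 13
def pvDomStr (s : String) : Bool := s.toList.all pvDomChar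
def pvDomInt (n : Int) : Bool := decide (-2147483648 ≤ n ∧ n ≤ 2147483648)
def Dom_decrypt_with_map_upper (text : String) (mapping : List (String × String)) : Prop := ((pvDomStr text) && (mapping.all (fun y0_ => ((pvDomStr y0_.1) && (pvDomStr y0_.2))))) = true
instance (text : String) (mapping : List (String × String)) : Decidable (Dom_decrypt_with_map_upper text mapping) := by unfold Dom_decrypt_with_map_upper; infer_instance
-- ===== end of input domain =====

-- B inverts the traversal: one overwrite pass per mapped alphabet letter over a mutable
-- character array, instead of A's single pass with a dict lookup per character; same value.

-- ===== PORT A =====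
-- 'ch in string.ascii_uppercase' for the single char ch is char membership in the letters
def decrypt_with_map_upper (text : String) (mapping : List (String × String)) : String :=
  PySem.Str.join ""
    ((PySem.Str.upper text).toList.foldl
      (fun acc c =>
        if c ∈ "ABCDEFGHIJKLMNOPQRSTUVWXYZ".toList then
          acc ++ [PySem.Dict.getD (PySem.Dict.mk mapping) (String.ofList [c]) (String.ofList [c])]
        else
          acc ++ [String.ofList [c]]) [])

-- ===== PORT B =====
-- inner pass 'for i, c in enumerate(up): if c == letter: out[i] = repl' walks up and out in
-- lockstep, overwriting the cells where up's char equals letter; ported as that recursion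
def pvOverwrite (up : List Char) (letter : Char) (repl : String) (out : List String) : List String :=
  match up, out with
  | [], _ => out
  | _, [] => []
  | c :: up', s :: out' => (if c == letter then repl else s) :: pvOverwrite up' letter repl out'

-- 'letter in mapping' then 'mapping[letter]' = Dict.get? returning some
def decrypt_with_map_upper_alt (text : String) (mapping : List (String × String)) : String :=
  let up := (PySem.Str.upper text).toList
  PySem.Str.join ""
    ("ABCDEFGHIJKLMNOPQRSTUVWXYZ".toList.foldl
      (fun out letter =>
        match (PySem.Dict.mk mapping).get? (String.ofList [letter]) with
        | some repl => pvOverwrite up letter repl out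
        | none => out)
      (up.map (fun c => String.ofList [c])))

-- ===== PRECONDITION & SPEC =====
def Spec_decrypt_with_map_upper (text : String) (mapping : List (String × String)) (out : String) : Prop := out = decrypt_with_map_upper_alt text mapping
instance (text : String) (mapping : List (String × String)) (out : String) : Decidable (Spec_decrypt_with_map_upper text mapping out) := by unfold Spec_decrypt_with_map_upper; infer_instance

-- ===== CLAIM (what is proved, stated in full; the proofs are below) =====
def Claim_equal_decrypt_with_map_upper : Prop := ∀ (text : String) (mapping : List (String × String)), Dom_decrypt_with_map_upper text mapping → Spec_decrypt_with_map_upper text mapping (decrypt_with_map_upper text mapping)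

-- ===== LEMMAS AND PROOFS =====

-- one overwrite pass on a mapped array is a map with the letter's cells replaced
theorem pvOverwrite_map (up : List Char) (letter : Char) (repl : String) (g : Char → String) :
    pvOverwrite up letter repl (up.map g)
      = up.map (fun c => if c == letter then repl else g c) := by
  induction up with
  | nil => rfl
  | cons c up' ih => simp [pvOverwrite, ih]

-- the effect of one letter's iteration on the per-position function
def pvStep (mapping : List (String × String)) (g : Char → String) (c : Char) : String :=
  match (PySem.Dict.mk mapping).get? (String.ofList [c]) with
  | some r => r
  | none => g c

theorem pvStep_idem (mapping : List (String × String)) (g : Char → String) (letter : Char) :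
    pvStep mapping (fun c => if c == letter then pvStep mapping g c else g c)
      = pvStep mapping g := by
  funext c
  unfold pvStep
  cases h : (PySem.Dict.mk mapping).get? (String.ofList [c]) with
  | some r => simp
  | none =>
    simp only
    by_cases hc : c == letter
    · simp [hc, h]
    · simp [hc]

-- folding the letter passes over a mapped array
theorem foldl_letters (mapping : List (String × String)) (L : List Char)
    (up : List Char) (g : Char → String) :
    L.foldl
      (fun out letter =>
        match (PySem.Dict.mk mapping).get? (String.ofList [letter]) with
        | some repl => pvOverwrite up letter repl out
        | none => out)
      (up.map g)
      = up.map (fun c => if c ∈ L then pvStep mapping g c else g c) := by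
  induction L generalizing g with
  | nil => simp
  | cons letter L' ih =>
    have hstep :
        (match (PySem.Dict.mk mapping).get? (String.ofList [letter]) with
          | some repl => pvOverwrite up letter repl (up.map g)
          | none => up.map g)
        = up.map (fun c => if c == letter then pvStep mapping g c else g c) := by
      cases h : (PySem.Dict.mk mapping).get? (String.ofList [letter]) with
      | some r =>
        dsimp only
        rw [pvOverwrite_map]
        apply List.map_congr_left
        intro c _
        by_cases hc : c == letter
        · have : c = letter := by exact beq_iff_eq.mp hc
          subst this
          simp [pvStep, h]
        · simp [hc]
      | none =>
        dsimp only
        apply (List.map_congr_left _).symm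
        intro c _
        by_cases hc : c == letter
        · have : c = letter := by exact beq_iff_eq.mp hc
          subst this
          simp [pvStep, h]
        · simp [hc]
    rw [List.foldl_cons, hstep, ih, pvStep_idem]
    apply List.map_congr_left
    intro c _
    simp only [List.mem_cons]
    by_cases hL : c ∈ L'
    · simp [hL]
    · by_cases hc : c = letter <;> simp [hc, hL]

-- ===== VERDICT (by name: the statement is the Claim_ definition above) =====
theorem decrypt_with_map_upper_spec : Claim_equal_decrypt_with_map_upper := by
  intro text mapping _
  unfold Spec_decrypt_with_map_upper decrypt_with_map_upper decrypt_with_map_upper_alt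
  have hfun :
      (fun (acc : List String) (c : Char) =>
        if c ∈ "ABCDEFGHIJKLMNOPQRSTUVWXYZ".toList then
          acc ++ [PySem.Dict.getD (PySem.Dict.mk mapping) (String.ofList [c]) (String.ofList [c])]
        else
          acc ++ [String.ofList [c]])
      = fun acc c => acc ++
          [if c ∈ "ABCDEFGHIJKLMNOPQRSTUVWXYZ".toList then
            PySem.Dict.getD (PySem.Dict.mk mapping) (String.ofList [c]) (String.ofList [c])
          else String.ofList [c]] := by
    funext acc c; split <;> rfl
  rw [hfun, PySem.List.foldl_append_singleton_eq_map]
  simp only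
  rw [foldl_letters mapping _ ((PySem.Str.upper text).toList) (fun c => String.ofList [c])]
  congr 1
  apply List.map_congr_left
  intro c _
  by_cases h : c ∈ "ABCDEFGHIJKLMNOPQRSTUVWXYZ".toList
  · rw [if_pos h, if_pos h]
    unfold pvStep
    cases hg : (PySem.Dict.mk mapping).get? (String.ofList [c]) <;>
      simp [PySem.Dict.getD, hg]
  · rw [if_neg h, if_neg h]
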